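-- pv_equiv track=rewrite | github.com/contiloop/scp_stage1 | src/preprocess.py | _sort_docs_for_packing
-- ===== SOURCE A (Python) =====
-- def _sort_docs_for_packing(tok_docs, pool_size=4096):
--     """Group similarly sized docs together within random pools to reduce padding."""
--     if pool_size <= 1:
--         return tok_docs
--
--     ordered = []
--     for start in range(0, len(tok_docs), pool_size):
--         pool = tok_docs[start:start + pool_size]
--         pool.sort(key=len, reverse=True)
--         ordered.extend(pool)
--     return ordered
-- ===== SOURCE B (Python) =====
-- def _sort_docs_for_packing(tok_docs, pool_size=4096):
--     """Group similarly sized docs together within random pools to reduce padding."""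
--     if pool_size <= 1:
--         return tok_docs
--     order = sorted(enumerate(tok_docs), key=lambda p: (p[0] // pool_size, -len(p[1])))
--     return [doc for _, doc in order]
-- ===== Notes on version B (the rewrite author's own statement) =====
-- stated objective: alternative
-- what changed: Replaces the per-pool slice-sort-extend loop with one global stable sort of enumerate(tok_docs) keyed by (index // pool_size, -len(doc)), then projects out the docs.
import Mathlib
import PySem

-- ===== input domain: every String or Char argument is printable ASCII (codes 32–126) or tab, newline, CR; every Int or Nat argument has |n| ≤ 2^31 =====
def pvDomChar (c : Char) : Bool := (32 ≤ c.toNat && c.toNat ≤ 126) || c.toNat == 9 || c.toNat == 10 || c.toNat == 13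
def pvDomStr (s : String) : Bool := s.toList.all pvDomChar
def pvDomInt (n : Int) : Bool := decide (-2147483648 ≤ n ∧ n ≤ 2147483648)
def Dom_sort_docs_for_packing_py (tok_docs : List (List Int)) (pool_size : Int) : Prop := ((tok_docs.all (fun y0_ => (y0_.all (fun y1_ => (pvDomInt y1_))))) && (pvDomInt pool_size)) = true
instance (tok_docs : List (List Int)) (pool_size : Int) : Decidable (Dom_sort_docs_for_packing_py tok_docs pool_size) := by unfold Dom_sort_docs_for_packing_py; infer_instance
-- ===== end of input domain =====

-- B replaces A's per-pool slice/sort/extend loop by ONE global stable sort of the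
-- enumerated list keyed by (index // pool_size, -len); same return value, alternative algorithm.

-- ===== PORT A =====
def sort_docs_for_packing_py (tok_docs : List (List Int)) (pool_size : Int) : List (List Int) :=
  if pool_size ≤ 1 then tok_docs
  else
    (PySem.List.pyRange 0 (tok_docs.length : Int) pool_size).foldl
      (fun acc start =>
        acc ++ PySem.List.sorted
          (PySem.List.slice tok_docs (some start) (some (start + pool_size)))
          (fun d => (d.length : Int)) true)
      []

-- ===== PORT B =====
def sort_docs_for_packing_py_alt (tok_docs : List (List Int)) (pool_size : Int) : List (List Int) :=
  if pool_size ≤ 1 then tok_docs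
  else
    (PySem.List.sorted2 (PySem.List.enumerate tok_docs 0)
        (fun q => PySem.Int.floordiv q.1 pool_size)
        (fun q => -(q.2.length : Int)) false).map (fun q => q.2)

-- ===== PRECONDITION & SPEC =====
def Spec_sort_docs_for_packing_py (tok_docs : List (List Int)) (pool_size : Int) (out : List (List Int)) : Prop := out = sort_docs_for_packing_py_alt tok_docs pool_size
instance (tok_docs : List (List Int)) (pool_size : Int) (out : List (List Int)) : Decidable (Spec_sort_docs_for_packing_py tok_docs pool_size out) := by unfold Spec_sort_docs_for_packing_py; infer_instance

-- ===== CLAIM (what is proved, stated in full; the proofs are below) =====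
def Claim_equal_sort_docs_for_packing_py : Prop := ∀ (tok_docs : List (List Int)) (pool_size : Int), Dom_sort_docs_for_packing_py tok_docs pool_size → Spec_sort_docs_for_packing_py tok_docs pool_size (sort_docs_for_packing_py tok_docs pool_size)

-- ===== LEMMAS AND PROOFS =====

-- generic facts about the insertion-sort fold that underlies PySem.List.sorted/sorted2

theorem pv_mem_foldl_insertBy {α : Type} (before : α → α → Bool) :
    ∀ (xs acc : List α) (y : α), y ∈ xs.foldl (fun acc x => PySem.List.insertBy before x acc) acc ↔ y ∈ acc ∨ y ∈ xs := by
  intro xs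
  induction xs with
  | nil => simp
  | cons x t ih =>
      intro acc y
      simp only [List.foldl_cons, ih, PySem.List.mem_insertBy, List.mem_cons]
      tauto

theorem pv_insertBy_append_left {α : Type} (before : α → α → Bool) (x : α) :
    ∀ (ys zs : List α), (∀ y ∈ ys, before x y = false) →
      PySem.List.insertBy before x (ys ++ zs) = ys ++ PySem.List.insertBy before x zs := by
  intro ys
  induction ys with
  | nil => simp
  | cons y t ih =>
      intro zs h
      have hy : before x y = false := h y (by simp)
      simp only [List.cons_append, PySem.List.insertBy, hy]
      simp only [Bool.false_eq_true, if_false]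
      have := ih zs (fun z hz => h z (by simp [hz]))
      -- unfold the recursive call shape
      cases t <;> simp_all [PySem.List.insertBy]

theorem pv_foldl_insertBy_lift {α : Type} (before : α → α → Bool) :
    ∀ (E S acc : List α), (∀ b ∈ E, ∀ a ∈ S, before b a = false) →
      E.foldl (fun acc x => PySem.List.insertBy before x acc) (S ++ acc)
        = S ++ E.foldl (fun acc x => PySem.List.insertBy before x acc) acc := by
  intro E
  induction E with
  | nil => simp
  | cons e t ih =>
      intro S acc h
      simp only [List.foldl_cons]
      rw [pv_insertBy_append_left before e S acc (fun a ha => h e (by simp) a ha)]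
      exact ih S _ (fun b hb a ha => h b (by simp [hb]) a ha)

theorem pv_foldl_insertBy_split {α : Type} (before : α → α → Bool) (E1 E2 : List α)
    (h : ∀ b ∈ E2, ∀ a ∈ E1, before b a = false) :
    (E1 ++ E2).foldl (fun acc x => PySem.List.insertBy before x acc) []
      = E1.foldl (fun acc x => PySem.List.insertBy before x acc) []
        ++ E2.foldl (fun acc x => PySem.List.insertBy before x acc) [] := by
  rw [List.foldl_append]
  have hS : ∀ a ∈ E1.foldl (fun acc x => PySem.List.insertBy before x acc) [], a ∈ E1 := by
    intro a ha
    rcases (pv_mem_foldl_insertBy before E1 [] a).1 ha with h' | h'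
    · cases h'
    · exact h'
  have := pv_foldl_insertBy_lift before E2 (E1.foldl (fun acc x => PySem.List.insertBy before x acc) []) []
      (fun b hb a ha => h b hb a (hS a ha))
  simpa using this

theorem pv_map_insertBy {α β : Type} (f : α → β) (before : β → β → Bool) (x : α) :
    ∀ (acc : List α),
      (PySem.List.insertBy (fun a b => before (f a) (f b)) x acc).map f
        = PySem.List.insertBy before (f x) (acc.map f) := by
  intro acc
  induction acc with
  | nil => simp [PySem.List.insertBy]
  | cons y t ih =>
      by_cases hb : before (f x) (f y)
      · simp [PySem.List.insertBy, hb]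
      · simp only [PySem.List.insertBy, hb, Bool.false_eq_true, if_false, List.map_cons] at *
        cases t <;> simp_all [PySem.List.insertBy]

theorem pv_map_foldl_insertBy {α β : Type} (f : α → β) (before : β → β → Bool) :
    ∀ (xs acc : List α),
      (xs.foldl (fun acc x => PySem.List.insertBy (fun a b => before (f a) (f b)) x acc) acc).map f
        = (xs.map f).foldl (fun acc x => PySem.List.insertBy before x acc) (acc.map f) := by
  intro xs
  induction xs with
  | nil => simp
  | cons x t ih =>
      intro acc
      simp only [List.foldl_cons, List.map_cons, ih, pv_map_insertBy]

theorem pv_insertBy_congr {α : Type} (before before' : α → α → Bool) (x : α) :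
    ∀ (ys : List α), (∀ y ∈ ys, before x y = before' x y) →
      PySem.List.insertBy before x ys = PySem.List.insertBy before' x ys := by
  intro ys
  induction ys with
  | nil => simp [PySem.List.insertBy]
  | cons y t ih =>
      intro h
      have hy : before x y = before' x y := h y (by simp)
      have ht := ih (fun z hz => h z (by simp [hz]))
      cases hxy : before' x y <;> simp only [PySem.List.insertBy, hy, hxy] <;>
        cases t <;> simp_all [PySem.List.insertBy]

theorem pv_foldl_insertBy_congr {α : Type} (before before' : α → α → Bool) (X : List α) :
    ∀ (xs acc : List α), (∀ a ∈ xs, a ∈ X) → (∀ a ∈ acc, a ∈ X) →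
      (∀ a ∈ X, ∀ b ∈ X, before a b = before' a b) →
      xs.foldl (fun acc x => PySem.List.insertBy before x acc) acc
        = xs.foldl (fun acc x => PySem.List.insertBy before' x acc) acc := by
  intro xs
  induction xs with
  | nil => simp
  | cons x t ih =>
      intro acc hxs hacc h
      have hx : x ∈ X := hxs x (by simp)
      simp only [List.foldl_cons]
      rw [pv_insertBy_congr before before' x acc (fun y hy => h x hx y (hacc y hy))]
      refine ih _ (fun a ha => hxs a (by simp [ha])) ?_ h
      intro a ha
      rcases (PySem.List.mem_insertBy before' x a acc).1 ha with h' | h'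
      · exact h' ▸ hx
      · exact hacc a h'

-- pyRange with a positive step: head and shift

theorem pv_pyRange_cons {a b p : Int} (hp : 0 < p) (hab : a < b) :
    PySem.List.pyRange a b p = a :: PySem.List.pyRange (a + p) b p := by
  rw [PySem.List.pyRange_of_pos a b hp, PySem.List.pyRange_of_pos (a + p) b hp]
  have h1 : (b - a + p - 1) / p = (b - a - 1) / p + 1 := by
    have : b - a + p - 1 = (b - a - 1) + 1 * p := by ring
    rw [this, Int.add_mul_ediv_right _ _ (by omega : p ≠ 0)]
  have hnn : 0 ≤ (b - a - 1) / p := Int.ediv_nonneg (by omega) (by omega)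
  by_cases h2 : a + p < b
  · have hc : (if a < b then ((b - a + p - 1) / p).toNat else 0) = ((b - (a + p) + p - 1) / p).toNat + 1 := by
      have : b - (a + p) + p - 1 = b - a - 1 := by ring
      rw [if_pos hab, this, h1]
      omega
    rw [hc, if_pos h2, List.range_succ_eq_map]
    simp only [List.map_cons, List.map_map]
    congr 1
    · push_cast; ring
    · apply List.map_congr_left
      intro n _
      simp only [Function.comp_apply]
      push_cast [Nat.succ_eq_add_one]; ring
  · have hz : (b - a - 1) / p = 0 := by
      apply Int.ediv_eq_zero_of_lt (by omega) (by omega)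
    have hc : (if a < b then ((b - a + p - 1) / p).toNat else 0) = 1 := by
      rw [if_pos hab, h1, hz]; rfl
    rw [hc, if_neg h2]
    simp

theorem pv_pyRange_shift {p : Int} (hp : 0 < p) (a b : Int) :
    PySem.List.pyRange (a + p) b p = (PySem.List.pyRange a (b - p) p).map (· + p) := by
  rw [PySem.List.pyRange_of_pos (a + p) b hp, PySem.List.pyRange_of_pos a (b - p) hp]
  have hcnt : b - (a + p) + p - 1 = b - p - a + p - 1 := by ring
  by_cases h : a + p < b
  · rw [if_pos h, if_pos (by omega : a < b - p), hcnt, List.map_map]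
    apply List.map_congr_left
    intro n _
    simp only [Function.comp_apply]
    ring
  · rw [if_neg h, if_neg (by omega : ¬ a < b - p)]
    simp

-- the common chunked form both ports are reduced to  (chunk size = k + 1)

def pvChunkRec (k : Nat) : List (List Int) → List (List Int)
  | [] => []
  | x :: t =>
      PySem.List.sorted (x :: t.take k) (fun d => (d.length : Int)) true
        ++ pvChunkRec k (t.drop k)
  termination_by l => l.length
  decreasing_by simp

theorem pv_A_chunks {p : Int} (hp : 1 < p) (ys : List (List Int)) :
    (PySem.List.pyRange 0 (ys.length : Int) p).flatMap
        (fun s => PySem.List.sorted (PySem.List.slice ys (some s) (some (s + p)))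
          (fun d => (d.length : Int)) true)
      = pvChunkRec (p.toNat - 1) ys := by
  cases hys : ys with
  | nil =>
      simp only [List.length_nil, Nat.cast_zero]
      rw [PySem.List.pyRange_of_pos 0 0 (by omega : (0:Int) < p), pvChunkRec]
      simp
  | cons x t =>
      have hn : (0 : Int) < ((x :: t).length : Int) := by simp
      have hk : p.toNat = (p.toNat - 1) + 1 := by omega
      have hpk : p = ((p.toNat : Nat) : Int) := by omega
      rw [pv_pyRange_cons (by omega) hn]
      simp only [List.flatMap_cons]
      have hhead : PySem.List.slice (x :: t) (some 0) (some (0 + p))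
          = (x :: t).take p.toNat := by
        have h0 : (0 : Int) + p = ((p.toNat : Nat) : Int) := by omega
        have h00 : (0 : Int) = ((0 : Nat) : Int) := by norm_num
        rw [h0, h00, PySem.List.slice_natCast]
        simp
      by_cases hkn : p.toNat < (x :: t).length
      · -- more than one chunk
        have hshift := pv_pyRange_shift (p := p) (by omega) 0 ((x :: t).length : Int)
        rw [hshift, List.flatMap_map]
        have hlen : (((x :: t).length : Int) - p) = (((x :: t).length - p.toNat : Nat) : Int) := by
          omega
        rw [hlen]
        have htail : ∀ s ∈ PySem.List.pyRange 0 (((x :: t).length - p.toNat : Nat) : Int) p,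
            PySem.List.sorted (PySem.List.slice (x :: t) (some (s + p)) (some (s + p + p)))
              (fun d => (d.length : Int)) true
            = PySem.List.sorted (PySem.List.slice ((x :: t).drop p.toNat) (some s) (some (s + p)))
              (fun d => (d.length : Int)) true := by
          intro s hs
          have hs0 : 0 ≤ s := ((PySem.List.mem_pyRange_iff_of_pos (by omega) s).1 hs).1
          obtain ⟨m, rfl⟩ : ∃ m : Nat, s = (m : Int) := ⟨s.toNat, by omega⟩
          have h2 : (m : Int) + p + p = ((m + p.toNat + p.toNat : Nat) : Int) := by push_cast; omega
          have h1 : (m : Int) + p = ((m + p.toNat : Nat) : Int) := by push_cast; omega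
          rw [h2, h1, PySem.List.slice_natCast, PySem.List.slice_natCast, List.drop_drop]
          have e3 : m + p.toNat + p.toNat - (m + p.toNat) = m + p.toNat - m := by omega
          rw [e3, Nat.add_comm p.toNat m]
        rw [List.flatMap_congr htail]  -- may need a different congruence name
        have hrec := pv_A_chunks hp ((x :: t).drop p.toNat)
        rw [List.length_drop] at hrec
        rw [hrec]
        conv_rhs => rw [pvChunkRec]
        congr 1
        · rw [hhead]
          congr 1
          conv_lhs => rw [hk]
          rw [List.take_succ_cons]
        · congr 1
          conv_lhs => rw [hk]
          rw [List.drop_succ_cons]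
      · -- last (single) chunk
        have hempty : PySem.List.pyRange (0 + p) ((x :: t).length : Int) p = [] := by
          rw [PySem.List.pyRange_of_pos _ _ (by omega : (0:Int) < p), if_neg (by simp only [List.length_cons] at hkn ⊢; push_cast; omega)]
          simp
        rw [hempty]
        conv_rhs => rw [pvChunkRec]
        have hkn' : (x :: t).length ≤ p.toNat := by omega
        have hdrop' : t.drop (p.toNat - 1) = [] := by
          apply List.drop_eq_nil_of_le
          simp only [List.length_cons] at hkn'
          omega
        rw [hdrop', pvChunkRec]
        simp only [List.flatMap_nil, List.append_nil]
        rw [hhead]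
        congr 2
        conv_lhs => rw [hk]
        rw [List.take_succ_cons]
  termination_by ys.length
  decreasing_by simp; omega

def pvBefore (p : Int) : (Int × List Int) → (Int × List Int) → Bool :=
  fun a b => decide (PySem.Int.floordiv a.1 p < PySem.Int.floordiv b.1 p)
    || (!decide (PySem.Int.floordiv b.1 p < PySem.Int.floordiv a.1 p)
        && decide (-(a.2.length : Int) < -(b.2.length : Int)))

theorem pv_sorted2_eq_foldl (p : Int) (E : List (Int × List Int)) :
    PySem.List.sorted2 E (fun q => PySem.Int.floordiv q.1 p)
        (fun q => -(q.2.length : Int)) false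
      = E.foldl (fun acc x => PySem.List.insertBy (pvBefore p) x acc) [] := by
  rfl

theorem pv_B_chunks {p : Int} (hp : 1 < p) (ys : List (List Int)) (c : Nat) :
    (PySem.List.sorted2 (PySem.List.enumerate ys ((c : Int) * p))
        (fun q => PySem.Int.floordiv q.1 p)
        (fun q => -(q.2.length : Int)) false).map (fun q => q.2)
      = pvChunkRec (p.toNat - 1) ys := by
  rw [pv_sorted2_eq_foldl]
  cases hys : ys with
  | nil => simp [pvChunkRec]
  | cons x t =>
      have hpk : p = ((p.toNat : Nat) : Int) := by omega
      have hk : p.toNat = (p.toNat - 1) + 1 := by omega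
      -- split the enumerated list at the first chunk boundary
      conv_lhs =>
        rw [show (x :: t) = List.take p.toNat (x :: t) ++ List.drop p.toNat (x :: t) from
          (List.take_append_drop _ _).symm]
      rw [PySem.List.enumerate_append]
      -- every element of the first chunk has bucket exactly c
      have hE1key : ∀ a ∈ PySem.List.enumerate ((x :: t).take p.toNat) ((c : Int) * p),
          PySem.Int.floordiv a.1 p = (c : Int) := by
        intro a ha
        rcases (PySem.List.mem_enumerate_iff _ _ a).1 ha with ⟨j, hj, rfl⟩
        have hjk : j < p.toNat := by
          have := List.length_take_le p.toNat (x :: t)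
          omega
        have hjp : (j : Int) < p := by omega
        rw [PySem.Int.floordiv_eq_iff_of_pos (by omega)]
        constructor
        · simp
        · have : ((c : Int) + 1) * p = (c : Int) * p + p := by ring
          rw [this]
          simp only [add_lt_add_iff_left]
          exact hjp
      -- every element of the tail sorts strictly after every element of the first chunk
      have hcross : ∀ b ∈ PySem.List.enumerate ((x :: t).drop p.toNat)
            ((c : Int) * p + (((x :: t).take p.toNat).length : Int)),
          ∀ a ∈ PySem.List.enumerate ((x :: t).take p.toNat) ((c : Int) * p),
          pvBefore p b a = false := by
        intro b hb a ha
        rcases (PySem.List.mem_enumerate_iff _ _ b).1 hb with ⟨j, hj, rfl⟩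
        have hkn : p.toNat < (x :: t).length := by
          simp only [List.length_drop] at hj
          omega
        have hlen : (((x :: t).take p.toNat).length : Int) = p := by
          rw [List.length_take]
          omega
        have hfb : (c : Int) + 1 ≤ PySem.Int.floordiv ((c : Int) * p + (((x :: t).take p.toNat).length : Int) + (j : Int)) p := by
          rw [PySem.Int.le_floordiv_iff_mul_le (by omega)]
          have h1 : ((c : Int) + 1) * p = (c : Int) * p + p := by ring
          rw [h1, hlen]
          have : (0 : Int) ≤ (j : Int) := by positivity
          linarith
        have hfa := hE1key a ha
        rw [hlen] at hfb ⊢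
        have h1 : ¬ (PySem.Int.floordiv ((c : Int) * p + p + (j : Int)) p < (c : Int)) := by omega
        have h2 : (c : Int) < PySem.Int.floordiv ((c : Int) * p + p + (j : Int)) p := by omega
        simp [pvBefore, hfa, h1, h2]
      rw [pv_foldl_insertBy_split (pvBefore p) _ _ hcross, List.map_append]
      -- first chunk: within one bucket the composite key degenerates to the length key
      have hE1 : (((PySem.List.enumerate ((x :: t).take p.toNat) ((c : Int) * p)).foldl
            (fun acc q => PySem.List.insertBy (pvBefore p) q acc) []).map (fun q => q.2))
          = PySem.List.sorted ((x :: t).take p.toNat) (fun d => (d.length : Int)) true := by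
        rw [pv_foldl_insertBy_congr (pvBefore p)
              (fun a b => decide (-(a.2.length : Int) < -(b.2.length : Int)))
              (PySem.List.enumerate ((x :: t).take p.toNat) ((c : Int) * p))
              _ [] (fun a ha => ha) (by simp)
              (by
                intro a ha b hb
                simp [pvBefore, hE1key a ha, hE1key b hb])]
        have hmap := pv_map_foldl_insertBy (fun q : Int × List Int => q.2)
            (fun d e => decide (-((d.length : Int)) < -((e.length : Int))))
            (PySem.List.enumerate ((x :: t).take p.toNat) ((c : Int) * p)) []
        simp only [List.map_nil] at hmap
        rw [hmap, PySem.List.map_snd_enumerate, PySem.List.sorted_rev_eq_foldl_insertBy]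
        have heq : (fun d e : List Int => decide (-((d.length : Int)) < -((e.length : Int))))
            = (fun d e : List Int => decide ((e.length : Int) < (d.length : Int))) := by
          funext d e
          simp [neg_lt_neg_iff]
        rw [heq]
      rw [hE1]
      -- tail
      by_cases hkn : p.toNat < (x :: t).length
      · have hlen : ((c : Int) * p + (((x :: t).take p.toNat).length : Int))
            = (((c + 1 : Nat) : Int)) * p := by
          rw [List.length_take]
          push_cast
          have h1 : min ((p.toNat : Nat) : Int) (((x :: t).length : Nat) : Int) = p := by omega
          rw [h1]
          ring
        rw [hlen, ← pv_sorted2_eq_foldl,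
            pv_B_chunks hp ((x :: t).drop p.toNat) (c + 1)]
        conv_rhs => rw [pvChunkRec]
        have hdt : List.take p.toNat (x :: t) = x :: List.take (p.toNat - 1) t := by
          conv_lhs => rw [hk]
          rw [List.take_succ_cons]
        have hdl : List.drop p.toNat (x :: t) = List.drop (p.toNat - 1) t := by
          conv_lhs => rw [hk]
          rw [List.drop_succ_cons]
        rw [hdt, hdl]
      · have hdrop : (x :: t).drop p.toNat = [] := by
          apply List.drop_eq_nil_of_le
          omega
        rw [hdrop]
        have htake : (x :: t).take p.toNat = x :: t := by
          apply List.take_of_length_le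
          omega
        conv_rhs => rw [pvChunkRec]
        have hdrop' : t.drop (p.toNat - 1) = [] := by
          apply List.drop_eq_nil_of_le
          simp only [List.length_cons] at hkn
          omega
        rw [hdrop', pvChunkRec]
        simp only [PySem.List.enumerate, List.foldl_nil, List.map_nil, List.append_nil]
        rw [htake]
        have hlt : t.length ≤ p.toNat - 1 := by
          simp only [List.length_cons] at hkn
          omega
        congr 2
        rw [List.take_of_length_le hlt]
  termination_by ys.length
  decreasing_by simp; omega

-- ===== VERDICT (by name: the statement is the Claim_ definition above) =====
theorem sort_docs_for_packing_py_spec : Claim_equal_sort_docs_for_packing_py := by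
  intro tok_docs pool_size _
  unfold Spec_sort_docs_for_packing_py sort_docs_for_packing_py sort_docs_for_packing_py_alt
  by_cases hp : pool_size ≤ 1
  · simp [hp]
  · have hp1 : 1 < pool_size := by omega
    rw [if_neg hp, if_neg hp]
    rw [PySem.List.foldl_append_eq_flatMap, List.nil_append]
    rw [pv_A_chunks hp1 tok_docs]
    have := pv_B_chunks hp1 tok_docs 0
    simpa using this.symm
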